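-- pv_equiv track=rewrite | github.com/moosefs/moosefs | mfsscripts/common/utils.py | labelexpr_to_str
-- ===== SOURCE A (Python) =====
-- def labelexpr_to_str(labelexpr, literals = ['*','&','|','~']):
-- 	any = literals[0]
-- 	andop = literals[1]
-- 	orop = literals[2]
-- 	notop = literals[3]
-- 	stack = []
-- 	if len(labelexpr)==0:
-- 		return any
-- 	if labelexpr[0]==0:
-- 		return any              # '*' any label
-- 	for i in labelexpr:
-- 		if i==255:
-- 			stack.append((0,any)) # '*' any label
-- 		elif i>=192 and i<255:
-- 			n = (i-192)
-- 			stack.append((0,chr(ord('A')+n)))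
-- 		elif i>=128 and i<192:
-- 			n = (i-128)+2
-- 			if n>len(stack):
-- 				return 'EXPR ERROR'
-- 			m = []
-- 			for _ in range(n):
-- 				l,s = stack.pop()
-- 				if l>1:
-- 					m.append("(%s)" % s)
-- 				else:
-- 					m.append(s)
-- 			m.reverse()
-- 			stack.append((1,andop.join(m)))   # '&' and operator
-- 		elif i>=64 and i<128:
-- 			n = (i-64)+2
-- 			if n>len(stack):
-- 				return 'EXPR ERROR'
-- 			m = []
-- 			for _ in range(n):
-- 				l,s = stack.pop()
-- 				if l>2:
-- 					m.append("(%s)" % s)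
-- 				else:
-- 					m.append(s)
-- 			m.reverse()
-- 			stack.append((2,orop.join(m)))   # '|' or operator
-- 		elif i==1:
-- 			if len(stack)==0:
-- 				return 'EXPR ERROR'
-- 			l,s = stack.pop()
-- 			if l>0:
-- 				stack.append((0,notop+"(%s)" % s)) # '~' not operator
-- 			else:
-- 				stack.append((0,notop+"%s" % s))   # '~' not operator
-- 		elif i==0:
-- 			break
-- 		else:
-- 			return 'EXPR ERROR'
-- 	if len(stack)!=1:
-- 		return 'EXPR ERROR'
-- 	l,s = stack.pop()
-- 	return s
-- ===== SOURCE B (Python) =====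
-- def labelexpr_to_str(labelexpr, literals=['*', '&', '|', '~']):
--     anylab, andop, orop, notop = literals[:4]
--     if len(labelexpr) == 0 or labelexpr[0] == 0:
--         return anylab
--     stack = []
--     for i in labelexpr:
--         if i == 0:
--             break
--         if i == 255:
--             stack.append(('atom', anylab))
--         elif 192 <= i < 255:
--             stack.append(('atom', chr(ord('A') + i - 192)))
--         elif 64 <= i < 192:
--             tag = 'and' if i >= 128 else 'or'
--             n = i - (128 if i >= 128 else 64) + 2
--             if n > len(stack):
--                 return 'EXPR ERROR'
--             children = stack[len(stack) - n:]
--             del stack[len(stack) - n:]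
--             stack.append((tag, children))
--         elif i == 1:
--             if not stack:
--                 return 'EXPR ERROR'
--             stack.append(('not', [stack.pop()]))
--         else:
--             return 'EXPR ERROR'
--     if len(stack) != 1:
--         return 'EXPR ERROR'
--     return _render(stack[0], andop, orop, notop)[1]
--
--
-- def _render(node, andop, orop, notop):
--     tag, payload = node
--     if tag == 'atom':
--         return (0, payload)
--     if tag == 'not':
--         l, s = _render(payload[0], andop, orop, notop)
--         return (0, notop + ('(%s)' % s if l > 0 else s))
--     op, lvl = (andop, 1) if tag == 'and' else (orop, 2)
--     parts = []
--     for c in payload: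
--         l, s = _render(c, andop, orop, notop)
--         parts.append('(%s)' % s if l > lvl else s)
--     return (lvl, op.join(parts))
-- ===== Notes on version B (the rewrite author's own statement) =====
-- stated objective: alternative
-- what changed: B splits A's single pass (a stack of already-parenthesized strings) into two passes: a stack machine that builds an AST of atom/NOT/AND/OR nodes, then a recursive renderer that computes each node's (level, string) and decides parenthesization per child.
import Mathlib
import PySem

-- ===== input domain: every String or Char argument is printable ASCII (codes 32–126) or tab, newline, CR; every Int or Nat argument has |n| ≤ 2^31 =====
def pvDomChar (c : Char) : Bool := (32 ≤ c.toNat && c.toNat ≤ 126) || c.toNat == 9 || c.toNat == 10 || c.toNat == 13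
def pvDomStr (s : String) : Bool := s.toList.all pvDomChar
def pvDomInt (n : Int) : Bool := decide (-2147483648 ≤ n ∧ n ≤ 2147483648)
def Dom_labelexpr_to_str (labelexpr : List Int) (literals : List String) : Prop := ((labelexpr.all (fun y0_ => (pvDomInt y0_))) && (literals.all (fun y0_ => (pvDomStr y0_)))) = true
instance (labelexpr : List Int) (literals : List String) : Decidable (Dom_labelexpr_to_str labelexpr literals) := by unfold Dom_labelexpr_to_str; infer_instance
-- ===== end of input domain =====

-- B replaces A's build-time parenthesization (a stack of (level, string) pairs) by a two-pass
-- AST: a stack machine pushing nodes, then a recursive renderer (objective: alternative).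

-- ===== PORT A =====
-- inner 'for _ in range(n): stack.pop()' loop of the and/or branches: pops k pairs,
-- wrapping each in parentheses when its level exceeds thr, and returns the remaining stack
def pvPopN (thr : Int) : Nat → List (Int × String) → (List String × List (Int × String))
  | 0, st => ([], st)
  | _+1, [] => ([], [])          -- unreachable: caller checks n ≤ len(stack)
  | k+1, (l, s) :: rest =>
    let r := pvPopN thr k rest
    ((if l > thr then "(" ++ s ++ ")" else s) :: r.1, r.2)

-- the main 'for i in labelexpr' loop; stack head = Python stack top; m is built in pop
-- order and reversed before joining, exactly as A does
def pvLoopA (anyl andop orop notop : String) : List Int → List (Int × String) → String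
  | [], stack => match stack with
    | [(_, s)] => s
    | _ => "EXPR ERROR"
  | i :: rest, stack =>
    if i = 255 then pvLoopA anyl andop orop notop rest ((0, anyl) :: stack)
    else if 192 ≤ i ∧ i < 255 then
      pvLoopA anyl andop orop notop rest ((0, String.mk [Char.ofNat (65 + (i - 192).toNat)]) :: stack)
    else if 128 ≤ i ∧ i < 192 then
      let n := (i - 128) + 2
      if n > (stack.length : Int) then "EXPR ERROR"
      else
        let p := pvPopN 1 n.toNat stack
        pvLoopA anyl andop orop notop rest ((1, PySem.Str.join andop p.1.reverse) :: p.2)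
    else if 64 ≤ i ∧ i < 128 then
      let n := (i - 64) + 2
      if n > (stack.length : Int) then "EXPR ERROR"
      else
        let p := pvPopN 2 n.toNat stack
        pvLoopA anyl andop orop notop rest ((2, PySem.Str.join orop p.1.reverse) :: p.2)
    else if i = 1 then
      match stack with
      | [] => "EXPR ERROR"
      | (l, s) :: rest' =>
        if l > 0 then pvLoopA anyl andop orop notop rest ((0, notop ++ "(" ++ s ++ ")") :: rest')
        else pvLoopA anyl andop orop notop rest ((0, notop ++ s) :: rest')
    else if i = 0 then
      match stack with      -- break: fall through to the post-loop check
      | [(_, s)] => s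
      | _ => "EXPR ERROR"
    else "EXPR ERROR"

def labelexpr_to_str (labelexpr : List Int) (literals : List String) : String :=
  let anyl := (PySem.List.pyGet? literals 0).getD ""
  let andop := (PySem.List.pyGet? literals 1).getD ""
  let orop := (PySem.List.pyGet? literals 2).getD ""
  let notop := (PySem.List.pyGet? literals 3).getD ""
  match labelexpr with
  | [] => anyl
  | i0 :: _ => if i0 = 0 then anyl else pvLoopA anyl andop orop notop labelexpr []

-- ===== PORT B =====
-- AST node: an atom carrying its string, or a NOT/AND/OR operator over children
mutual
inductive PvNode where
  | atom : String → PvNode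
  | notN : PvNode → PvNode
  | andN : PvNodeList → PvNode
  | orN  : PvNodeList → PvNode
inductive PvNodeList where
  | nil : PvNodeList
  | cons : PvNode → PvNodeList → PvNodeList
end

def pvNL : List PvNode → PvNodeList
  | [] => .nil
  | n :: ns => .cons n (pvNL ns)

-- first pass of B: stack machine pushing nodes; none = early 'EXPR ERROR' return,
-- a zero byte breaks the loop returning the stack
def pvLoopB (anyl : String) : List Int → List PvNode → Option (List PvNode)
  | [], stack => some stack
  | i :: rest, stack =>
    if i = 0 then some stack
    else if i = 255 then pvLoopB anyl rest (.atom anyl :: stack)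
    else if 192 ≤ i ∧ i < 255 then
      pvLoopB anyl rest (.atom (String.mk [Char.ofNat (65 + (i - 192).toNat)]) :: stack)
    else if 64 ≤ i ∧ i < 192 then
      let n := if 128 ≤ i then (i - 128) + 2 else (i - 64) + 2
      if n > (stack.length : Int) then none
      else
        let children := pvNL (stack.take n.toNat).reverse
        pvLoopB anyl rest ((if 128 ≤ i then PvNode.andN children else PvNode.orN children) :: stack.drop n.toNat)
    else if i = 1 then
      match stack with
      | [] => none
      | top :: rest' => pvLoopB anyl rest (.notN top :: rest')
    else none

-- second pass of B: _render, returning (level, string)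
mutual
def pvRender (andop orop notop : String) : PvNode → Int × String
  | .atom s => (0, s)
  | .notN c =>
    let r := pvRender andop orop notop c
    (0, notop ++ (if r.1 > 0 then "(" ++ r.2 ++ ")" else r.2))
  | .andN cs => (1, PySem.Str.join andop (pvRenderList andop orop notop 1 cs))
  | .orN cs  => (2, PySem.Str.join orop (pvRenderList andop orop notop 2 cs))
def pvRenderList (andop orop notop : String) (lvl : Int) : PvNodeList → List String
  | .nil => []
  | .cons c cs =>
    let r := pvRender andop orop notop c
    (if r.1 > lvl then "(" ++ r.2 ++ ")" else r.2) :: pvRenderList andop orop notop lvl cs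
end

def labelexpr_to_str_alt (labelexpr : List Int) (literals : List String) : String :=
  match literals with
  | anyl :: andop :: orop :: notop :: _ =>
    (match labelexpr with
     | [] => anyl
     | i0 :: _ =>
       if i0 = 0 then anyl
       else
         match pvLoopB anyl labelexpr [] with
         | none => "EXPR ERROR"
         | some [node] => (pvRender andop orop notop node).2
         | some _ => "EXPR ERROR")
  | _ => ""                      -- unreachable under Pre_: fewer than 4 literals raises in Python

-- ===== PRECONDITION & SPEC =====
-- A starts by indexing the first four literals and raises IndexError when literals has fewer
-- than four elements (B's unpacking raises ValueError there); Pre_ excludes exactly those.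
def Pre_labelexpr_to_str (labelexpr : List Int) (literals : List String) : Prop :=
  4 ≤ literals.length
instance (labelexpr : List Int) (literals : List String) : Decidable (Pre_labelexpr_to_str labelexpr literals) := by unfold Pre_labelexpr_to_str; infer_instance

def pvWitness_labelexpr_to_str : List Int × List String :=
  ([193, 194, 128], ["*", "&", "|", "~"])

def Spec_labelexpr_to_str (labelexpr : List Int) (literals : List String) (out : String) : Prop := out = labelexpr_to_str_alt labelexpr literals
instance (labelexpr : List Int) (literals : List String) (out : String) : Decidable (Spec_labelexpr_to_str labelexpr literals out) := by unfold Spec_labelexpr_to_str; infer_instance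

-- ===== CLAIM (what is proved, stated in full; the proofs are below) =====
def Claim_equal_labelexpr_to_str : Prop := ∀ (labelexpr : List Int) (literals : List String), Dom_labelexpr_to_str labelexpr literals → Pre_labelexpr_to_str labelexpr literals → Spec_labelexpr_to_str labelexpr literals (labelexpr_to_str labelexpr literals)

-- ===== LEMMAS AND PROOFS =====

-- the string A stores for a node: wrap in parentheses when the level exceeds thr
def pvWrap (andop orop notop : String) (thr : Int) (nd : PvNode) : String :=
  if (pvRender andop orop notop nd).1 > thr then "(" ++ (pvRender andop orop notop nd).2 ++ ")"
  else (pvRender andop orop notop nd).2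

lemma renderList_NL (andop orop notop : String) (thr : Int) :
    ∀ (l : List PvNode), pvRenderList andop orop notop thr (pvNL l) = l.map (pvWrap andop orop notop thr) := by
  intro l
  induction l with
  | nil => rfl
  | cons x xs ih => simp [pvNL, pvRenderList, pvWrap, ih]

lemma popN_spec (andop orop notop : String) (thr : Int) :
    ∀ (k : Nat) (st : List PvNode), k ≤ st.length →
      pvPopN thr k (st.map (pvRender andop orop notop)) =
        ((st.take k).map (pvWrap andop orop notop thr), (st.drop k).map (pvRender andop orop notop)) := by
  intro k
  induction k with
  | zero => intro st _; simp [pvPopN]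
  | succ k ih =>
    intro st hlen
    cases st with
    | nil => simp at hlen
    | cons x xs =>
      simp only [List.length_cons, Nat.succ_le_succ_iff] at hlen
      simp [pvPopN, pvWrap, ih xs hlen]

lemma loop_sim (anyl andop orop notop : String) :
    ∀ (bs : List Int) (st : List PvNode),
      pvLoopA anyl andop orop notop bs (st.map (pvRender andop orop notop)) =
        (match pvLoopB anyl bs st with
         | none => "EXPR ERROR"
         | some [node] => (pvRender andop orop notop node).2
         | some _ => "EXPR ERROR") := by
  intro bs
  induction bs with
  | nil =>
    intro st
    cases st with
    | nil => rfl
    | cons x t => cases t <;> simp [pvLoopA, pvLoopB]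
  | cons i rest ih =>
    intro st
    by_cases h255 : i = 255
    · subst h255
      simpa [pvLoopA, pvLoopB] using ih (.atom anyl :: st)
    · by_cases hlit : 192 ≤ i ∧ i < 255
      · have : i ≠ 0 := by omega
        simp only [pvLoopA, pvLoopB, if_neg h255, if_pos hlit, if_neg this]
        simpa [pvLoopA] using ih (.atom (String.mk [Char.ofNat (65 + (i - 192).toNat)]) :: st)
      · by_cases hand : 128 ≤ i ∧ i < 192
        · have h0 : i ≠ 0 := by omega
          have hor : 64 ≤ i ∧ i < 192 := by omega
          have h128 : 128 ≤ i := hand.1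
          simp only [pvLoopA, pvLoopB, if_neg h255, if_neg hlit, if_pos hand, if_neg h0,
            if_pos hor, if_pos h128, List.length_map]
          by_cases hn : (i - 128) + 2 > (st.length : Int)
          · simp [hn]
          · have hk : ((i - 128) + 2).toNat ≤ st.length := by omega
            simp only [if_neg hn, popN_spec andop orop notop 1 _ st hk]
            have := ih ((PvNode.andN (pvNL (st.take ((i - 128) + 2).toNat).reverse)) :: st.drop ((i - 128) + 2).toNat)
            simpa [pvRender, renderList_NL, List.map_reverse] using this
        · by_cases horb : 64 ≤ i ∧ i < 128
          · have h0 : i ≠ 0 := by omega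
            have hor : 64 ≤ i ∧ i < 192 := by omega
            have h128 : ¬ 128 ≤ i := by omega
            simp only [pvLoopA, pvLoopB, if_neg h255, if_neg hlit, if_neg hand, if_pos horb,
              if_neg h0, if_pos hor, if_neg h128, List.length_map]
            by_cases hn : (i - 64) + 2 > (st.length : Int)
            · simp [hn]
            · have hk : ((i - 64) + 2).toNat ≤ st.length := by omega
              simp only [if_neg hn, popN_spec andop orop notop 2 _ st hk]
              have := ih ((PvNode.orN (pvNL (st.take ((i - 64) + 2).toNat).reverse)) :: st.drop ((i - 64) + 2).toNat)
              simpa [pvRender, renderList_NL, List.map_reverse] using this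
          · by_cases h1 : i = 1
            · subst h1
              cases st with
              | nil => simp [pvLoopA, pvLoopB]
              | cons top rest' =>
                have := ih (.notN top :: rest')
                by_cases hl : (pvRender andop orop notop top).1 > 0 <;>
                  simpa [pvLoopA, pvLoopB, pvRender, hl, String.append_assoc] using this
            · by_cases h0 : i = 0
              · subst h0
                cases st with
                | nil => simp [pvLoopA, pvLoopB]
                | cons x t => cases t <;> simp [pvLoopA, pvLoopB]
              · have hor : ¬ (64 ≤ i ∧ i < 192) := by omega
                simp [pvLoopA, pvLoopB, h255, hlit, hand, horb, h1, h0, hor]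

-- ===== VERDICT (by name: the statement is the Claim_ definition above) =====
theorem labelexpr_to_str_spec : Claim_equal_labelexpr_to_str := by
  intro labelexpr literals _ hpre
  unfold Spec_labelexpr_to_str
  match literals, hpre with
  | anyl :: andop :: orop :: notop :: t, _ =>
    have e0 : (PySem.List.pyGet? (anyl :: andop :: orop :: notop :: t) 0).getD "" = anyl := by
      rw [show (0:Int) = ((0:Nat):Int) by norm_num, PySem.List.pyGet?_natCast]; simp
    have e1 : (PySem.List.pyGet? (anyl :: andop :: orop :: notop :: t) 1).getD "" = andop := by
      rw [show (1:Int) = ((1:Nat):Int) by norm_num, PySem.List.pyGet?_natCast]; simp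
    have e2 : (PySem.List.pyGet? (anyl :: andop :: orop :: notop :: t) 2).getD "" = orop := by
      rw [show (2:Int) = ((2:Nat):Int) by norm_num, PySem.List.pyGet?_natCast]; simp
    have e3 : (PySem.List.pyGet? (anyl :: andop :: orop :: notop :: t) 3).getD "" = notop := by
      rw [show (3:Int) = ((3:Nat):Int) by norm_num, PySem.List.pyGet?_natCast]; simp
    unfold labelexpr_to_str labelexpr_to_str_alt
    simp only [e0, e1, e2, e3]
    cases labelexpr with
    | nil => simp
    | cons i0 rest =>
      by_cases h : i0 = 0
      · simp [h]
      · simpa [h] using loop_sim anyl andop orop notop (i0 :: rest) []
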